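-- pv_equiv track=rewrite | github.com/haydendaly/experiments | euler/42.py | count_triangle_words
-- ===== SOURCE A (Python) =====
-- def get_word_value(word):
--     word_value = 0
--     for char in word:
--         word_value += ord(char) - 64
--     return word_value
--
-- def count_triangle_words(words):
--     triangle_set = set()
--     upper_limit = 26 * max([len(word) for word in words]) * 5
--     curr = 0
--     i = 1
--     while curr < upper_limit:
--         curr = i * (i + 1) // 2
--         triangle_set.add(curr)
--         i += 1
--
--     count = 0
--     for word in words:
--         word_value = get_word_value(word)
--         if word_value in triangle_set:
--             count += 1
--     return count
-- ===== SOURCE B (Python) =====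
-- def get_word_value(word):
--     word_value = 0
--     for char in word:
--         word_value += ord(char) - 64
--     return word_value
--
-- def _isqrt(m):
--     s = 0
--     while (s + 1) * (s + 1) <= m:
--         s += 1
--     return s
--
-- def is_triangle(n):
--     if n < 1:
--         return False
--     m = 8 * n + 1
--     s = _isqrt(m)
--     return s * s == m
--
-- def count_triangle_words(words):
--     count = 0
--     for word in words:
--         if is_triangle(get_word_value(word)):
--             count += 1
--     return count
-- ===== Notes on version B (the rewrite author's own statement) =====
-- stated objective: simpler
-- what changed: Drops A's precomputed set of triangular numbers (built up to a length-derived limit) and instead tests each word value directly with a closed-form criterion: v is triangular iff v >= 1 and 8v+1 is a perfect square (integer square root by a simple scan).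
-- outside the precondition, e.g. on count_triangle_words([]): A raises ValueError, B returns 0
import Mathlib
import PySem

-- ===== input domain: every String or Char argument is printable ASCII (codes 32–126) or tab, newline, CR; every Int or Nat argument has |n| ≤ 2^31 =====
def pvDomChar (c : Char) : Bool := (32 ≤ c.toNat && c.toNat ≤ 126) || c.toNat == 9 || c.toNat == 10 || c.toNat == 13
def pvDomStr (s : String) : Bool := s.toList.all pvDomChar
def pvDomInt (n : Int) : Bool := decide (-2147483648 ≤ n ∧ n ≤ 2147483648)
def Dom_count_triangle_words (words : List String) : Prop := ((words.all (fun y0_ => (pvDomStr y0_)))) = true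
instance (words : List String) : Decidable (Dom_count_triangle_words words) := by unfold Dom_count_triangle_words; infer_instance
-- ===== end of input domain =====

-- B replaces A's precomputed table of triangular numbers by a per-value closed-form
-- perfect-square test (8v+1 a perfect square); objective: simpler, no speed claim.

-- ===== PORT A =====
-- get_word_value (shared: both Pythons define it identically)
def pvWordValue (word : String) : Int :=
  word.toList.foldl (fun acc c => acc + ((c.toNat : Int) - 64)) 0

-- exactness of '//' on the even product i*(i+1) (used by the port's termination proof)
theorem pvTriHalf (i : Int) : 2 * PySem.Int.floordiv (i * (i + 1)) 2 = i * (i + 1) := by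
  have hdvd : (2 : Int) ∣ i * (i + 1) := (Int.even_mul_succ_self i).two_dvd
  have hmod : PySem.Int.mod (i * (i + 1)) 2 = 0 :=
    (PySem.Int.mod_eq_zero_iff_dvd _ _).2 hdvd
  have := PySem.Int.floordiv_mul_add_mod (i * (i + 1)) 2
  omega

-- the 'while curr < upper_limit' loop of A; the proof arguments record the loop
-- invariant (curr is the (i-1)-st triangular number) needed only for termination
def pvTriLoop (upper i curr : Int) (s : PySem.Set Int)
    (hi : 1 ≤ i) (hc : 2 * curr = i * (i - 1)) : PySem.Set Int :=
  if curr < upper then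
    let curr' := PySem.Int.floordiv (i * (i + 1)) 2
    pvTriLoop upper (i + 1) curr' (PySem.Set.add s curr') (by omega)
      (by have := pvTriHalf i; simp only [curr']; ring_nf; ring_nf at this; omega)
  else s
termination_by (upper - curr).toNat
decreasing_by
  have h2 := pvTriHalf i
  have : curr < PySem.Int.floordiv (i * (i + 1)) 2 := by nlinarith
  omega

def count_triangle_words (words : List String) : Int :=
  match PySem.List.max? (words.map (fun w => PySem.Str.len w)) (fun x => x) with
  | none => 0   -- unreachable: Python's max([]) raises ValueError, excluded by Pre_
  | some mx =>
    let upper := 26 * mx * 5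
    let tset := pvTriLoop upper 1 0 PySem.Set.empty (by omega) (by ring)
    words.foldl (fun count w =>
      if PySem.Set.contains tset (pvWordValue w) then count + 1 else count) 0

-- ===== PORT B =====
-- _isqrt of Source B: linear scan for the integer square root; the proof argument
-- records 0 ≤ s, needed only for termination
def pvIsqrtLoop (m s : Int) (hs : 0 ≤ s) : Int :=
  if (s + 1) * (s + 1) ≤ m then pvIsqrtLoop m (s + 1) (by omega) else s
termination_by (m - s).toNat
decreasing_by
  have : s + 1 ≤ m := by nlinarith
  omega

def pvIsTriangle (n : Int) : Bool :=
  if n < 1 then false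
  else
    let m := 8 * n + 1
    let s := pvIsqrtLoop m 0 (le_refl 0)
    s * s == m

def count_triangle_words_alt (words : List String) : Int :=
  words.foldl (fun count w =>
    if pvIsTriangle (pvWordValue w) then count + 1 else count) 0

-- ===== PRECONDITION & SPEC =====
-- Pre_ excludes only the empty list, on which A's max([]) raises ValueError (B returns 0 there).
def Pre_count_triangle_words (words : List String) : Prop := words ≠ []
instance (words : List String) : Decidable (Pre_count_triangle_words words) := by
  unfold Pre_count_triangle_words; infer_instance

def pvWitness_count_triangle_words : List String := ["ABC"]

def Spec_count_triangle_words (words : List String) (out : Int) : Prop :=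
  out = count_triangle_words_alt words
instance (words : List String) (out : Int) : Decidable (Spec_count_triangle_words words out) := by
  unfold Spec_count_triangle_words; infer_instance

-- ===== CLAIM (what is proved, stated in full; the proofs are below) =====
def Claim_equal_count_triangle_words : Prop := ∀ (words : List String),
  Dom_count_triangle_words words → Pre_count_triangle_words words →
  Spec_count_triangle_words words (count_triangle_words words)

-- ===== LEMMAS AND PROOFS =====

-- membership in the set built by A's while loop
theorem pvTriLoop_mem (upper i curr : Int) (s : PySem.Set Int)
    (hi : 1 ≤ i) (hc : 2 * curr = i * (i - 1)) (v : Int) :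
    v ∈ pvTriLoop upper i curr s hi hc ↔
      v ∈ s ∨ ∃ j : Int, i ≤ j ∧ 2 * v = j * (j + 1) ∧ j * (j - 1) < 2 * upper := by
  fun_induction pvTriLoop upper i curr s hi hc with
  | case1 i curr s hi hc h curr' ih =>
    have h2 := pvTriHalf i
    rw [ih, PySem.Set.mem_add]
    constructor
    · rintro ((hv | hv) | ⟨j, hij, hjv, hjb⟩)
      · exact Or.inl hv
      · exact Or.inr ⟨i, le_refl i, by omega, by omega⟩
      · exact Or.inr ⟨j, by omega, hjv, hjb⟩
    · rintro (hv | ⟨j, hij, hjv, hjb⟩)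
      · exact Or.inl (Or.inl hv)
      · rcases eq_or_lt_of_le hij with hji | hji
        · exact Or.inl (Or.inr (by subst hji; omega))
        · exact Or.inr ⟨j, by omega, hjv, hjb⟩
  | case2 i curr s hi hc h =>
    constructor
    · exact Or.inl
    · rintro (hv | ⟨j, hij, hjv, hjb⟩)
      · exact hv
      · exfalso
        have : i * (i - 1) ≤ j * (j - 1) := by nlinarith
        omega

-- the result of Source B's _isqrt loop, given the invariant s*s ≤ m
theorem pvIsqrtLoop_spec (m s : Int) (hs : 0 ≤ s) (hle : s * s ≤ m) :
    0 ≤ pvIsqrtLoop m s hs ∧ pvIsqrtLoop m s hs * pvIsqrtLoop m s hs ≤ m ∧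
      m < (pvIsqrtLoop m s hs + 1) * (pvIsqrtLoop m s hs + 1) := by
  fun_induction pvIsqrtLoop m s hs with
  | case1 s hs h ih => exact ih (by nlinarith)
  | case2 s hs h => exact ⟨hs, hle, by omega⟩

-- pvIsTriangle tests exactly triangularity
theorem pvIsTriangle_iff (v : Int) :
    pvIsTriangle v = true ↔ ∃ j : Int, 1 ≤ j ∧ 2 * v = j * (j + 1) := by
  unfold pvIsTriangle
  split_ifs with hv
  · simp only [false_iff]
    rintro ⟨j, hj, he⟩
    nlinarith
  · have spec := pvIsqrtLoop_spec (8 * v + 1) 0 (le_refl 0) (by omega)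
    set r := pvIsqrtLoop (8 * v + 1) 0 (le_refl 0) with hr
    obtain ⟨hr0, hrle, hrlt⟩ := spec
    simp only [beq_iff_eq]
    constructor
    · intro h'
      have h : r * r = 8 * v + 1 := h'
      rcases Int.even_or_odd r with ⟨k, hk⟩ | ⟨k, hk⟩
      · exfalso
        have hkk : r * r = 4 * (k * k) := by rw [hk]; ring
        omega
      · have hk0 : 0 ≤ k := by omega
        refine ⟨k, ?_, by nlinarith⟩
        rcases eq_or_lt_of_le hk0 with hk1 | hk1
        · exfalso; nlinarith
        · omega
    · rintro ⟨j, hj, he⟩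
      have hm : (2 * j + 1) * (2 * j + 1) = 8 * v + 1 := by nlinarith
      have h1 : r ≤ 2 * j + 1 := by nlinarith
      have h2 : 2 * j + 1 ≤ r := by nlinarith
      have hrj : r = 2 * j + 1 := by omega
      show r * r = 8 * v + 1
      rw [hrj]; exact hm

-- word values are bounded by 62 per character on the ASCII domain
theorem pvWordValue_foldl_le (cs : List Char) (acc : Int) (h : cs.all pvDomChar = true) :
    cs.foldl (fun acc c => acc + ((c.toNat : Int) - 64)) acc ≤ acc + 62 * (cs.length : Int) := by
  induction cs generalizing acc with
  | nil => simp
  | cons c cs ih =>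
    simp only [List.all_cons, Bool.and_eq_true] at h
    have hc : c.toNat ≤ 126 := by
      have := h.1
      simp only [pvDomChar, Bool.or_eq_true, Bool.and_eq_true, decide_eq_true_eq, beq_iff_eq] at this
      omega
    have := ih (acc + ((c.toNat : Int) - 64)) h.2
    simp only [List.foldl_cons, List.length_cons]
    push_cast
    push_cast at this
    omega

theorem pvWordValue_le (w : String) (hw : pvDomStr w = true) :
    pvWordValue w ≤ 62 * (w.toList.length : Int) := by
  have := pvWordValue_foldl_le w.toList 0 hw
  unfold pvWordValue
  omega

theorem count_triangle_words_spec : Claim_equal_count_triangle_words := by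
  intro words hdom hpre
  unfold Spec_count_triangle_words count_triangle_words count_triangle_words_alt
  cases hmax : PySem.List.max? (words.map (fun w => PySem.Str.len w)) (fun x => x) with
  | none =>
    exfalso
    rw [PySem.List.max?_eq_none_iff, List.map_eq_nil_iff] at hmax
    exact hpre hmax
  | some mx =>
    have hmem := PySem.List.max?_mem hmax
    have hmax' := PySem.List.max?_isMax hmax
    obtain ⟨w0, _, hw0⟩ := List.mem_map.mp hmem
    have hmx0 : 0 ≤ mx := by
      rw [← hw0, PySem.Str.len_eq]; positivity
    apply PySem.List.foldl_congr_mem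
    intro acc w hw
    have hwd : pvDomStr w = true := by
      unfold Dom_count_triangle_words at hdom
      rw [List.all_eq_true] at hdom
      exact hdom w hw
    have hvle : pvWordValue w ≤ 62 * mx := by
      have h1 := pvWordValue_le w hwd
      have h2 := hmax' _ (List.mem_map_of_mem hw)
      rw [PySem.Str.len_eq] at h2
      omega
    have hkey : PySem.Set.contains
        (pvTriLoop (26 * mx * 5) 1 0 PySem.Set.empty (by omega) (by ring))
        (pvWordValue w) = pvIsTriangle (pvWordValue w) := by
      rw [Bool.eq_iff_iff, PySem.Set.contains_iff, pvTriLoop_mem, pvIsTriangle_iff]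
      set v := pvWordValue w
      constructor
      · rintro (hv | ⟨j, hj, he, _⟩)
        · simp [PySem.Set.empty] at hv
        · exact ⟨j, hj, he⟩
      · rintro ⟨j, hj, he⟩
        refine Or.inr ⟨j, hj, he, ?_⟩
        nlinarith
    simp only [hkey]
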